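-- pv_equiv track=rewrite | github.com/ErdemGunseli/Other | Project Euler/40_Champernowne.py | generate_champernowne
-- ===== SOURCE A (Python) =====
-- def generate_champernowne(limit):
--     sequence = ""
--     length = 0
--     num = 1
--
--     while length < limit:
--         num_str = str(num)
--         sequence = sequence + num_str
--         length += len(num_str)
--         num += 1
--
--     return sequence
-- ===== SOURCE B (Python) =====
-- def generate_champernowne(limit):
--     # Arithmetic: find the smallest n whose cumulative digit count reaches limit,
--     # then emit "12345...n" in one join pass (no per-number length tracking).
--     if limit <= 0:
--         return ""
--     d = 1
--     total = 0  # digits contributed by all numbers with fewer than d digits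
--     while total + 9 * 10 ** (d - 1) * d < limit:
--         total += 9 * 10 ** (d - 1) * d
--         d += 1
--     n = 10 ** (d - 1) + (limit - total - 1) // d
--     return ''.join(str(i) for i in range(1, n + 1))
-- ===== Notes on version B (the rewrite author's own statement) =====
-- stated objective: faster
-- what changed: Replaces A's per-number length-tracking loop with repeated string concatenation by block-wise digit arithmetic that computes the final number N directly, then emits '12...N' with a single str.join pass.
import Mathlib
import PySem

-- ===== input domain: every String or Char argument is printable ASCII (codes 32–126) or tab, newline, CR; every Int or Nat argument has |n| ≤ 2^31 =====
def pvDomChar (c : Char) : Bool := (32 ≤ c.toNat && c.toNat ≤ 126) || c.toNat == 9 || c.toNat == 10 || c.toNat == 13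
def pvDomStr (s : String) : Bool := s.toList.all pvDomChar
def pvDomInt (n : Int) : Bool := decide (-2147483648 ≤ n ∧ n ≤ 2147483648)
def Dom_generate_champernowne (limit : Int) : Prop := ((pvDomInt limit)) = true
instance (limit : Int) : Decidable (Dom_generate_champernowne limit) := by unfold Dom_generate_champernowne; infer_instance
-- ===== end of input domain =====

-- B replaces A's per-number length-tracking concatenation loop by block-wise digit
-- arithmetic for the final number N plus one join pass (alternative decomposition).

-- ===== PORT A =====
-- A's while-loop: state (sequence, length, num); strings handled on the List Char side.
-- fuel = limit.toNat is a totality guard only: the loop body runs at most limit.toNat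
-- times (length grows by ≥ 1 per iteration), after which the condition is false anyway.
def champLoop (limit : Int) (fuel : Nat) (seq : List Char) (len : Int) (num : Int) : List Char :=
  match fuel with
  | 0 => seq
  | Nat.succ fuel =>
    if len < limit then
      champLoop limit fuel (seq ++ PySem.Int.toChars num)
        (len + ((PySem.Int.toChars num).length : Int)) (num + 1)
    else seq

def generate_champernowne (limit : Int) : String :=
  String.ofList (champLoop limit limit.toNat [] 0 1)

-- ===== PORT B =====
-- B's block loop: advance digit-length d while the whole d-digit block fits strictly
-- below limit; fuel = limit.toNat is a totality guard only (total grows by ≥ 9 per step).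
def champFindD (limit : Int) (fuel : Nat) (d total : Int) : Int × Int :=
  match fuel with
  | 0 => (d, total)
  | Nat.succ fuel =>
    if total + 9 * 10 ^ (d - 1).toNat * d < limit then
      champFindD limit fuel (d + 1) (total + 9 * 10 ^ (d - 1).toNat * d)
    else (d, total)

def generate_champernowne_alt (limit : Int) : String :=
  if limit ≤ 0 then String.ofList []
  else
    let p := champFindD limit limit.toNat 1 0
    let n := 10 ^ (p.1 - 1).toNat + PySem.Int.floordiv (limit - p.2 - 1) p.1
    String.ofList (PySem.Chars.join []
      ((PySem.List.pyRange 1 (n + 1) 1).map (fun i => PySem.Int.toChars i)))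

-- ===== PRECONDITION & SPEC =====
def Spec_generate_champernowne (limit : Int) (out : String) : Prop := out = generate_champernowne_alt limit
instance (limit : Int) (out : String) : Decidable (Spec_generate_champernowne limit out) := by unfold Spec_generate_champernowne; infer_instance

-- ===== CLAIM (what is proved, stated in full; the proofs are below) =====
def Claim_equal_generate_champernowne : Prop := ∀ (limit : Int), Dom_generate_champernowne limit → Spec_generate_champernowne limit (generate_champernowne limit)

-- ===== LEMMAS AND PROOFS =====

-- the Champernowne prefix "12…k" and its length
def champCat : ℕ → List Char
  | 0 => []
  | k + 1 => champCat k ++ Nat.toDigits 10 (k + 1)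

def champCum (k : ℕ) : ℕ := (champCat k).length

theorem champ_toChars_nat (n : ℕ) :
    PySem.Int.toChars (n : Int) = Nat.toDigits 10 n := by
  simp [PySem.Int.toChars]

-- exact length of Nat.toDigits
theorem champ_toDigitsCore_len (f : ℕ) : ∀ (n : ℕ) (l : List Char), n < 10 ^ (f + 1) →
    (Nat.toDigitsCore 10 (f + 1) n l).length = l.length + Nat.log 10 n + 1 := by
  induction f with
  | zero =>
    intro n l h
    rw [Nat.toDigitsCore]
    have hn : n < 10 := by omega
    rw [if_pos (Nat.div_eq_of_lt hn)]
    simp [Nat.log_eq_zero_iff.2 (Or.inl hn)]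
  | succ f ih =>
    intro n l h
    rw [Nat.toDigitsCore]
    split
    · rename_i h10
      have hn : n < 10 := by
        by_contra hc
        have : 1 ≤ n / 10 := Nat.one_le_div_iff (by norm_num) |>.2 (by omega)
        omega
      simp [Nat.log_eq_zero_iff.2 (Or.inl hn)]
    · rename_i h10
      have hn : 10 ≤ n := by by_contra hc; exact h10 (Nat.div_eq_of_lt (by omega))
      have hdiv : n / 10 < 10 ^ (f + 1) := by
        rw [Nat.div_lt_iff_lt_mul (by norm_num)]
        calc n < 10 ^ (f + 1 + 1) := h
        _ = 10 ^ (f + 1) * 10 := by ring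
      rw [ih (n / 10) _ hdiv]
      have hld := Nat.log_div_base 10 n
      have hlog : 1 ≤ Nat.log 10 n := Nat.log_pos (by norm_num) hn
      simp only [List.length_cons]
      omega

theorem champ_digs_len (n : ℕ) : (Nat.toDigits 10 n).length = Nat.log 10 n + 1 := by
  have hlt : n < 10 ^ (n + 1) := by
    calc n < n + 1 := Nat.lt_succ_self n
    _ ≤ 10 ^ (n + 1) := Nat.le_of_lt (Nat.lt_pow_self (by norm_num))
  simpa [Nat.toDigits] using champ_toDigitsCore_len n n [] hlt

theorem champCum_succ (k : ℕ) :
    champCum (k + 1) = champCum k + (Nat.log 10 (k + 1) + 1) := by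
  simp [champCum, champCat, champ_digs_len]

theorem champCum_mono {j k : ℕ} (h : j ≤ k) : champCum j ≤ champCum k := by
  induction k with
  | zero =>
    have hj : j = 0 := Nat.le_zero.mp h
    simp [hj]
  | succ k ih =>
    rcases Nat.lt_or_ge j (k + 1) with h' | h'
    · have := ih (by omega); rw [champCum_succ]; omega
    · have hj : j = k + 1 := by omega
      simp [hj]

theorem champCum_ge (k : ℕ) : k ≤ champCum k := by
  induction k with
  | zero => omega
  | succ k ih => rw [champCum_succ]; omega

-- A's loop lands exactly on champCat N for the minimal N whose length reaches limit
theorem champLoop_eq (limit : Int) (N : ℕ) (hN : limit ≤ (champCum N : Int))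
    (hlt : ∀ j : ℕ, j < N → (champCum j : Int) < limit) :
    ∀ (fuel k : ℕ), N - k ≤ fuel → k ≤ N →
      champLoop limit fuel (champCat k) (champCum k) ((k : Int) + 1) = champCat N := by
  intro fuel
  induction fuel with
  | zero =>
    intro k h1 h2
    have hk : k = N := by omega
    subst hk
    rfl
  | succ fuel ih =>
    intro k h1 h2
    rcases Nat.eq_or_lt_of_le h2 with hk | hk
    · subst hk
      rw [champLoop, if_neg (by omega)]
    · have hcond : (champCum k : Int) < limit := hlt k hk
      rw [champLoop, if_pos hcond]
      have htc : PySem.Int.toChars ((k : Int) + 1) = Nat.toDigits 10 (k + 1) := by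
        have := champ_toChars_nat (k + 1)
        push_cast at this
        exact this
      have hcat : champCat k ++ PySem.Int.toChars ((k : Int) + 1) = champCat (k + 1) := by
        rw [htc]; rfl
      have hcum : (champCum k : Int) + ((PySem.Int.toChars ((k : Int) + 1)).length : Int)
          = (champCum (k + 1) : Int) := by
        rw [htc]
        have : champCum (k + 1) = champCum k + (Nat.toDigits 10 (k + 1)).length := by
          simp [champCum, champCat]
        rw [this]; push_cast; ring
      rw [hcat, hcum]
      have : ((k : Int) + 1) + 1 = ((k + 1 : ℕ) : Int) + 1 := by push_cast; ring
      rw [this]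
      exact ih (k + 1) (by omega) (by omega)

theorem generate_champernowne_eq_cat (limit : Int) (N : ℕ)
    (hN : limit ≤ (champCum N : Int))
    (hlt : ∀ j : ℕ, j < N → (champCum j : Int) < limit) :
    generate_champernowne limit = String.ofList (champCat N) := by
  unfold generate_champernowne
  have hNle : N ≤ limit.toNat := by
    match N with
    | 0 => omega
    | Nat.succ M =>
      have h1 := hlt M (by omega)
      have h2 := champCum_ge M
      omega
  have h := champLoop_eq limit N hN hlt limit.toNat 0 (by omega) (by omega)
  have h0 : champLoop limit limit.toNat [] 0 1 = champCat N := by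
    simpa [champCum, champCat] using h
  exact congrArg String.ofList h0

-- B's join over range(1, n+1) is champCat n
theorem champJoin_append (xs : List (List Char)) (y : List Char) :
    PySem.Chars.join [] (xs ++ [y]) = PySem.Chars.join [] xs ++ y := by
  induction xs with
  | nil => simp [PySem.Chars.join, List.intercalate]
  | cons a t ih =>
    cases t with
    | nil => simp [PySem.Chars.join, List.intercalate]
    | cons b t' =>
      simp only [List.cons_append] at ih ⊢
      rw [PySem.Chars.join_cons_cons, ih, PySem.Chars.join_cons_cons]
      simp

theorem champJoin_eq (n : ℕ) :
    PySem.Chars.join []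
      ((PySem.List.pyRange 1 ((n : Int) + 1) 1).map (fun i => PySem.Int.toChars i))
      = champCat n := by
  induction n with
  | zero =>
    simp [PySem.List.pyRange, champCat, PySem.Chars.join_nil]
  | succ n ih =>
    have h1 : (1 : Int) ≤ (n : Int) + 1 := by omega
    have : PySem.List.pyRange 1 (((n + 1 : ℕ) : Int) + 1) 1
        = PySem.List.pyRange 1 ((n : Int) + 1) 1 ++ [(n : Int) + 1] := by
      have := PySem.List.pyRange_one_succ_right (a := 1) (b := (n : Int) + 1) h1
      push_cast
      exact this
    rw [this, List.map_append, List.map_singleton, champJoin_append, ih]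
    have : PySem.Int.toChars ((n : Int) + 1) = Nat.toDigits 10 (n + 1) := by
      have := champ_toChars_nat (n + 1); push_cast at this; exact this
    rw [this]; rfl

-- digit-length is d on the d-digit block
theorem champ_digs_on_block (d j : ℕ) (hd : 1 ≤ d)
    (h1 : 10 ^ (d - 1) ≤ j) (h2 : j < 10 ^ d) :
    Nat.log 10 j + 1 = d := by
  have : Nat.log 10 j = d - 1 := by
    have hd' : d - 1 + 1 = d := by omega
    apply Nat.log_eq_of_pow_le_of_lt_pow h1
    rw [hd']; exact h2
  omega

theorem champCum_run (d : ℕ) (hd : 1 ≤ d) :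
    ∀ (j : ℕ), 10 ^ (d - 1) - 1 + j ≤ 10 ^ d - 1 →
      champCum (10 ^ (d - 1) - 1 + j) = champCum (10 ^ (d - 1) - 1) + j * d := by
  intro j
  induction j with
  | zero => simp
  | succ j ih =>
    intro h
    have hs : 1 ≤ (10:ℕ) ^ (d - 1) := Nat.one_le_pow _ _ (by norm_num)
    have hsd : (10:ℕ) ^ (d-1) ≤ 10 ^ d := Nat.pow_le_pow_right (by norm_num) (by omega)
    have hstep : 10 ^ (d - 1) - 1 + (j + 1) = (10 ^ (d - 1) - 1 + j) + 1 := by omega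
    rw [hstep, champCum_succ, ih (by omega)]
    have hj1 : 10 ^ (d - 1) ≤ 10 ^ (d - 1) - 1 + j + 1 := by omega
    have hj2 : 10 ^ (d - 1) - 1 + j + 1 < 10 ^ d := by omega
    rw [champ_digs_on_block d _ hd hj1 hj2]
    ring

-- invariant of B's block loop
theorem champFindD_inv (limit : Int) :
    ∀ (fuel : ℕ) (d total : Int), 1 ≤ d → (limit - total).toNat ≤ fuel →
    total < limit → total = (champCum (10 ^ (d - 1).toNat - 1) : Int) →
    1 ≤ (champFindD limit fuel d total).1 ∧
    (champFindD limit fuel d total).2 < limit ∧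
    (champFindD limit fuel d total).2
      = (champCum (10 ^ ((champFindD limit fuel d total).1 - 1).toNat - 1) : Int) ∧
    limit ≤ (champFindD limit fuel d total).2
      + 9 * 10 ^ ((champFindD limit fuel d total).1 - 1).toNat * (champFindD limit fuel d total).1 := by
  intro fuel
  induction fuel with
  | zero =>
    intro d total hd hfuel hlim hcum
    omega
  | succ fuel ih =>
    intro d total hd hfuel hlim hcum
    by_cases hcond : total + 9 * 10 ^ (d - 1).toNat * d < limit
    · rw [champFindD, if_pos hcond]
      have hp : (0 : Int) < 10 ^ (d - 1).toNat := pow_pos (by norm_num) _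
      have hb : (1 : Int) ≤ 9 * 10 ^ (d - 1).toNat * d := by nlinarith
      refine ih (d + 1) (total + 9 * 10 ^ (d - 1).toNat * d) (by omega) (by omega) hcond ?_
      -- new total = champCum (10 ^ d.toNat - 1)
      have hdt : ((d + 1) - 1).toNat = (d - 1).toNat + 1 := by omega
      rw [hdt]
      have hblock := champCum_run ((d - 1).toNat + 1) (by omega)
        (9 * 10 ^ (d - 1).toNat) (by
          simp only [Nat.add_sub_cancel]
          have hs : 1 ≤ (10:ℕ) ^ (d - 1).toNat := Nat.one_le_pow _ _ (by norm_num)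
          have h10 : (10:ℕ) ^ ((d - 1).toNat + 1) = 10 * 10 ^ (d - 1).toNat := by ring
          omega)
      simp only [Nat.add_sub_cancel] at hblock
      have hs : 1 ≤ (10:ℕ) ^ (d - 1).toNat := Nat.one_le_pow _ _ (by norm_num)
      have harg : 10 ^ (d - 1).toNat - 1 + 9 * 10 ^ (d - 1).toNat
          = 10 ^ ((d - 1).toNat + 1) - 1 := by
        have : (10:ℕ) ^ ((d - 1).toNat + 1) = 10 * 10 ^ (d - 1).toNat := by ring
        omega
      rw [harg] at hblock
      rw [hblock, hcum]
      have hd10 : ((10:ℕ) ^ (d - 1).toNat : Int) = (10:Int) ^ (d - 1).toNat := by push_cast; ring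
      push_cast
      have hdd : ((d - 1).toNat : Int) + 1 = d := by omega
      nlinarith [hdd]
    · rw [champFindD, if_neg hcond]
      refine ⟨hd, hlim, hcum, ?_⟩
      show limit ≤ total + 9 * 10 ^ (d - 1).toNat * d
      omega

-- ===== VERDICT (by name: the statement is the Claim_ definition above) =====
theorem generate_champernowne_spec : Claim_equal_generate_champernowne := by
  unfold Claim_equal_generate_champernowne
  intro limit _
  unfold Spec_generate_champernowne
  by_cases hle : limit ≤ 0
  · rw [generate_champernowne_alt, if_pos hle]
    exact generate_champernowne_eq_cat limit 0 (by simp [champCum, champCat]; omega)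
      (by omega)
  · have hpos : 0 < limit := by omega
    obtain ⟨hd1, hlt', hcumt, hub⟩ := champFindD_inv limit limit.toNat 1 0 (le_refl 1)
      (by omega) hpos (by norm_num [champCum, champCat])
    set d := (champFindD limit limit.toNat 1 0).1 with hdd
    set t := (champFindD limit limit.toNat 1 0).2 with htt
    set dN := (d - 1).toNat with hdN
    set s : ℕ := 10 ^ dN with hs
    have hdpos : (0 : Int) < d := by omega
    have hdInt : ((dN : ℕ) : Int) + 1 = d := by omega
    set q := PySem.Int.floordiv (limit - t - 1) d with hq
    have hbr := (PySem.Int.floordiv_eq_iff_of_pos hdpos).mp hq.symm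
    rw [hcumt] at hbr hlt' hub
    have hsPos : 1 ≤ s := Nat.one_le_pow _ _ (by norm_num)
    have hsInt : ((s : ℕ) : Int) = (10 : Int) ^ dN := by rw [hs]; push_cast; ring
    have hq0 : 0 ≤ q := by nlinarith [hbr.2, hlt', hdpos]
    have hqub : q + 1 ≤ 9 * (s : Int) := by
      have h1 : q * d ≤ 9 * (s : Int) * d - 1 := by rw [hsInt]; linarith [hbr.1, hub]
      have hq9 : q < 9 * (s : Int) := lt_of_mul_lt_mul_right (by linarith) (le_of_lt hdpos)
      linarith
    set nI := (10 : Int) ^ dN + q with hn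
    have hp10 : (0 : Int) < (10 : Int) ^ dN := pow_pos (by norm_num) _
    set N := nI.toNat with hN0
    have hNint : ((N : ℕ) : Int) = nI := Int.toNat_of_nonneg (by omega)
    have hNeq : N = s + q.toNat := by rw [hN0, hn, ← hsInt]; omega
    have hqNat : ((q.toNat : ℕ) : Int) = q := Int.toNat_of_nonneg hq0
    have h10s : (10 : ℕ) ^ (dN + 1) = 10 * s := by rw [hs]; ring
    have hrun := champCum_run (dN + 1) (by omega)
    simp only [Nat.add_sub_cancel] at hrun
    rw [← hs] at hrun
    have hqnb : q.toNat + 1 ≤ 9 * s := by omega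
    have hcumN1 : champCum (s - 1 + q.toNat) = champCum (s - 1) + q.toNat * (dN + 1) :=
      hrun q.toNat (by omega)
    have hcumN2 : champCum (s - 1 + (q.toNat + 1)) = champCum (s - 1) + (q.toNat + 1) * (dN + 1) :=
      hrun (q.toNat + 1) (by omega)
    have hNs : s - 1 + (q.toNat + 1) = N := by omega
    have hcumN : limit ≤ (champCum N : Int) := by
      rw [← hNs, hcumN2]
      push_cast
      rw [hqNat, hdInt]
      linarith [hbr.2]
    have hcumlt : ∀ j : ℕ, j < N → (champCum j : Int) < limit := by
      intro j hj
      have hmono : champCum j ≤ champCum (s - 1 + q.toNat) := champCum_mono (by omega)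
      have hclt : (champCum (s - 1 + q.toNat) : Int) < limit := by
        rw [hcumN1]
        push_cast
        rw [hqNat, hdInt]
        linarith [hbr.1]
      have hmono' : (champCum j : Int) ≤ (champCum (s - 1 + q.toNat) : Int) := by
        exact_mod_cast hmono
      linarith
    calc generate_champernowne limit
        = String.ofList (champCat N) := generate_champernowne_eq_cat limit N hcumN hcumlt
      _ = generate_champernowne_alt limit := by
          rw [generate_champernowne_alt, if_neg hle]
          show String.ofList (champCat N) = String.ofList (PySem.Chars.join []
            ((PySem.List.pyRange 1 (nI + 1) 1).map (fun i => PySem.Int.toChars i)))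
          rw [← hNint]
          exact (congrArg String.ofList (champJoin_eq N)).symm
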